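-- pv_equiv track=rewrite | github.com/aws/aws-sam-cli | samcli/hook_packages/terraform/hooks/prepare/makefile_generator.py | _get_parent_modules
-- ===== SOURCE A (Python) =====
-- from typing import List, Optional
--
-- def _get_parent_modules(module_address: Optional[str]) -> List[str]:
--     """
--     Convert an a full Terraform resource address to a list of module
--     addresses from the root module to the current module
--
--     e.g. "module.level1_lambda.module.level2_lambda" as input will return
--     ["module.level1_lambda", "module.level1_lambda.module.level2_lambda"]
--
--     Parameters
--     ----------
--     module_address: str
--        Full address of the Terraform module
--
--     Returns
--     -------
--     List[str]
--        List of module addresses starting from the root module to the current module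
--     """
--     if not module_address:
--         return []
--
--     # Split the address on "." then combine it back with the "module" prefix for each module name
--     modules = module_address.split(".")
--     modules = [".".join(modules[i : i + 2]) for i in range(0, len(modules), 2)]
--
--     if not modules:
--         # The format of the address was somehow different than we expected from the
--         # module.<name>.module.<child_module_name>
--         return []
--
--     # Prefix each nested module name with the previous
--     previous_module = modules[0]
--     full_path_modules = [previous_module]
--     for module in modules[1:]:
--         norm_module = previous_module + "." + module
--         previous_module = norm_module
--         full_path_modules.append(norm_module)
--     return full_path_modules
-- ===== SOURCE B (Python) =====
-- from typing import List, Optional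
--
--
-- def _get_parent_modules(module_address: Optional[str]) -> List[str]:
--     if not module_address:
--         return []
--     parts = module_address.split(".")
--     return [".".join(parts[:i + 2]) for i in range(0, len(parts), 2)]
-- ===== Notes on version B (the rewrite author's own statement) =====
-- stated objective: simpler
-- what changed: B drops A's two-stage group-into-('module',name)-pairs-then-accumulate pipeline: it splits once and computes each cumulative prefix independently as '.'.join(parts[:i+2]) over range(0, len(parts), 2), with no pair-grouping list and no previous_module accumulator.
import Mathlib
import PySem

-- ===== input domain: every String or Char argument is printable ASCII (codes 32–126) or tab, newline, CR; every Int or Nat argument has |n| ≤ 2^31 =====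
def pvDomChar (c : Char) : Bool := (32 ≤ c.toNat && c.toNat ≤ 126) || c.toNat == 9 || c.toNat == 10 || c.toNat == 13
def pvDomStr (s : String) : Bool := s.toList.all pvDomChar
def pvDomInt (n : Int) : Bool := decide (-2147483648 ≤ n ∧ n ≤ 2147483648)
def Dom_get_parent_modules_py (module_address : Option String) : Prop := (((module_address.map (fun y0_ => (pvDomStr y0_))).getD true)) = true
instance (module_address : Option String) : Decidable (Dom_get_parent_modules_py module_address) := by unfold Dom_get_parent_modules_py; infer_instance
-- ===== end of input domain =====

-- B replaces A's group-then-accumulate pipeline with one direct slice-join per prefix (objective: simpler).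


-- exact port of Python's `x + "." + y` (string concatenation, kept on List Char so the kernel can unfold it)
def pvDotCat (x y : String) : String := String.ofList (x.toList ++ '.' :: y.toList)

-- ===== PORT A =====
def get_parent_modules_py (module_address : Option String) : List String :=
  match module_address with
  | none => []                                   -- `if not module_address` (None is falsy)
  | some s =>
    if PySem.Str.len s = 0 then []               -- `if not module_address` ("" is falsy)
    else
      let modules := (PySem.Str.split? s ".").getD []   -- sep "." ≠ "", so split? is `some`
      let modules2 := (PySem.List.pyRange 0 (modules.length : Int) 2).map
        (fun i => PySem.Str.join "." (PySem.List.slice modules (some i) (some (i + 2))))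
      match modules2 with
      | [] => []                                 -- `if not modules`
      | m0 :: rest =>                            -- m0 = modules[0], rest = modules[1:]
        (rest.foldl
          (fun (st : String × List String) m =>
            let norm := pvDotCat st.1 m          -- previous_module + "." + module
            (norm, st.2 ++ [norm]))
          (m0, [m0])).2

-- ===== PORT B =====
def get_parent_modules_py_alt (module_address : Option String) : List String :=
  match module_address with
  | none => []
  | some s =>
    if PySem.Str.len s = 0 then []
    else
      let parts := (PySem.Str.split? s ".").getD []
      (PySem.List.pyRange 0 (parts.length : Int) 2).map
        (fun i => PySem.Str.join "." (PySem.List.slice parts none (some (i + 2))))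

-- ===== PRECONDITION & SPEC =====
def Spec_get_parent_modules_py (module_address : Option String) (out : List String) : Prop := out = get_parent_modules_py_alt module_address
instance (module_address : Option String) (out : List String) : Decidable (Spec_get_parent_modules_py module_address out) := by unfold Spec_get_parent_modules_py; infer_instance

-- ===== CLAIM (what is proved, stated in full; the proofs are below) =====
def Claim_equal_get_parent_modules_py : Prop := ∀ (module_address : Option String), Dom_get_parent_modules_py module_address → Spec_get_parent_modules_py module_address (get_parent_modules_py module_address)

-- ===== LEMMAS AND PROOFS =====

-- `.`-join of an appended list splits at the seam when both halves are nonempty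
theorem pv_intercalate_append (sep : List Char) (xs ys : List (List Char))
    (hx : xs ≠ []) (hy : ys ≠ []) :
    sep.intercalate (xs ++ ys) = sep.intercalate xs ++ sep ++ sep.intercalate ys := by
  induction xs with
  | nil => exact absurd rfl hx
  | cons p ps ih =>
    cases ps with
    | nil =>
      cases ys with
      | nil => exact absurd rfl hy
      | cons q qs => simp [List.intercalate]
    | cons p' ps' =>
      have := ih (by simp)
      simp only [List.cons_append] at this ⊢
      simp [List.intercalate] at this ⊢
      simpa [List.append_assoc] using this

-- join of a prefix of `parts`, the value B computes at index i
def pvJ (parts : List String) (k : Nat) : String :=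
  PySem.Str.join "." (parts.take k)

theorem pv_key (parts : List String) (a : Nat) (h1 : 1 ≤ a) (hlt : a < parts.length) :
    pvDotCat (pvJ parts a) (PySem.Str.join "." ((parts.drop a).take 2)) = pvJ parts (a + 2) := by
  unfold pvJ pvDotCat PySem.Str.join
  congr 1
  simp only [PySem.Chars.join, String.toList_ofList]
  have htake : parts.take (a + 2) = parts.take a ++ (parts.drop a).take 2 := List.take_add
  rw [htake, List.map_append,
    pv_intercalate_append ".".toList ((parts.take a).map String.toList)
      (((parts.drop a).take 2).map String.toList)
      (by
        have hne : parts ≠ [] := List.ne_nil_of_length_pos (by omega)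
        simp [hne]; omega)
      (by simp; omega)]
  simp

-- induction forms of range(a, b, 2)
theorem pv_pyRange_two_nil (a b : Int) (h : b ≤ a) : PySem.List.pyRange a b 2 = [] := by
  rw [PySem.List.pyRange_of_pos a b (by norm_num)]
  simp [show ¬ a < b by omega]

theorem pv_pyRange_two_cons (a b : Int) (h : a < b) :
    PySem.List.pyRange a b 2 = a :: PySem.List.pyRange (a + 2) b 2 := by
  rw [PySem.List.pyRange_of_pos a b (by norm_num), PySem.List.pyRange_of_pos (a+2) b (by norm_num)]
  by_cases h2 : a + 2 < b
  · simp only [if_pos h, if_pos h2]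
    have hmn : ((b - a + 2 - 1)/2).toNat = ((b - (a+2) + 2 - 1)/2).toNat + 1 := by omega
    rw [hmn, List.range_succ_eq_map]
    simp only [List.map_cons, List.map_map, Function.comp_def]
    congr 1
    · simp
    · apply List.map_congr_left
      intro k _
      push_cast
      ring
  · simp only [if_pos h, if_neg h2]
    have hmn : ((b - a + 2 - 1)/2).toNat = 1 := by omega
    rw [hmn]
    simp

-- A's accumulator loop, started at the prefix join for index a, produces exactly B's prefix joins
theorem pv_loop (parts : List String) :
    ∀ (fuel : Nat) (a : Nat) (acc : List String), 1 ≤ a → parts.length ≤ a + fuel →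
    ((PySem.List.pyRange (a : Int) (parts.length : Int) 2).foldl
        (fun (st : String × List String) i =>
          let norm := pvDotCat st.1 (PySem.Str.join "." (PySem.List.slice parts (some i) (some (i + 2))))
          (norm, st.2 ++ [norm]))
        (pvJ parts a, acc)).2
      = acc ++ (PySem.List.pyRange (a : Int) (parts.length : Int) 2).map
          (fun i => pvJ parts (i.toNat + 2)) := by
  intro fuel
  induction fuel with
  | zero =>
    intro a acc h1 hle
    rw [pv_pyRange_two_nil _ _ (by exact_mod_cast hle)]
    simp
  | succ fuel ih =>
    intro a acc h1 hle
    by_cases hab : (a : Int) < (parts.length : Int)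
    · have halt : a < parts.length := by exact_mod_cast hab
      rw [pv_pyRange_two_cons _ _ hab]
      simp only [List.foldl_cons, List.map_cons]
      have hslice : PySem.List.slice parts (some (a : Int)) (some ((a : Int) + 2)) = (parts.drop a).take 2 := by
        rw [PySem.List.slice_toNat parts (by positivity) (by positivity)]
        congr 1; omega
      rw [hslice, pv_key parts a h1 halt]
      have hcast : (a : Int) + 2 = ((a + 2 : Nat) : Int) := by push_cast; ring
      rw [hcast, ih (a + 2) (acc ++ [pvJ parts (a + 2)]) (by omega) (by omega)]
      simp [Int.toNat_natCast]
    · rw [pv_pyRange_two_nil _ _ (by omega)]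
      simp

-- ===== VERDICT (by name: the statement is the Claim_ definition above) =====
theorem get_parent_modules_py_spec : Claim_equal_get_parent_modules_py := by
  intro ma _
  unfold Spec_get_parent_modules_py get_parent_modules_py get_parent_modules_py_alt
  cases ma with
  | none => rfl
  | some s =>
    by_cases hs : PySem.Str.len s = 0
    · simp only [PySem.Str.len_eq, Nat.cast_eq_zero, List.length_eq_zero_iff] at hs
      have hseq : s = "" := by
        have := congrArg String.ofList hs
        simpa using this
      simp [hseq]
    · simp only [if_neg hs]
      set parts := (PySem.Str.split? s ".").getD [] with hparts
      rcases Nat.eq_zero_or_pos parts.length with h0 | hpos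
      · rw [show ((parts.length : Nat) : Int) = 0 by exact_mod_cast h0, pv_pyRange_two_nil 0 0 le_rfl]
        simp
      · have h0lt : (0:Int) < (parts.length : Int) := by exact_mod_cast hpos
        rw [pv_pyRange_two_cons 0 _ h0lt]
        simp only [List.map_cons, List.foldl_map]
        have h02 : ((0:Int) + 2) = ((2 : Nat) : Int) := by norm_num
        have hg0 : PySem.Str.join "." (PySem.List.slice parts (some 0) (some (0 + 2))) = pvJ parts 2 := by
          rw [h02, PySem.List.slice_zero_start, PySem.List.slice_to_natCast]
          rfl
        have hb0 : PySem.Str.join "." (PySem.List.slice parts none (some (0 + 2))) = pvJ parts 2 := by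
          rw [h02, PySem.List.slice_to_natCast]
          rfl
        rw [hg0, hb0, h02, pv_loop parts parts.length 2 [pvJ parts 2] (by omega) (by omega)]
        rw [List.singleton_append]
        congr 1
        apply List.map_congr_left
        intro i hi
        have hi2 : (2 : Int) ≤ i := ((PySem.List.mem_pyRange_iff_of_pos (by norm_num) i).mp hi).1
        rw [PySem.List.slice_to parts (by omega)]
        unfold pvJ PySem.Str.join
        congr 4
        omega
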